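-- pv_equiv track=rewrite | github.com/teoat/nexus378 | NEXUS_app/consolidate_markdown.py | _adjust_heading_levels
-- ===== SOURCE A (Python) =====
-- def _adjust_heading_levels(content: str, min_level: int = 1) -> str:
--     """Adjust heading levels to fit within the consolidated document structure"""
--     lines = content.split("\n")
--     adjusted_lines = []
--
--     for line in lines:
--         if line.startswith("#"):
--             # Count leading #s
--             level = len(line) - len(line.lstrip("#"))
--             # Adjust level to be at least min_level
--             new_level = max(level, min_level)
--             # Replace with new level
--             adjusted_line = "#" * new_level + line[level:]
--             adjusted_lines.append(adjusted_line)
--         else: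
--             adjusted_lines.append(line)
--
--     return "\n".join(adjusted_lines)
-- ===== SOURCE B (Python) =====
-- def _adjust_heading_levels(content: str, min_level: int = 1) -> str:
--     """Single streaming pass: at each line start, rewrite the run of '#'s
--     to max(run length, min_level); everything else is copied verbatim."""
--     out = []
--     i = 0
--     n = len(content)
--     at_start = True
--     while i < n:
--         c = content[i]
--         if at_start and c == "#":
--             j = i
--             while j < n and content[j] == "#":
--                 j += 1
--             out.append("#" * max(j - i, min_level))
--             i = j
--             at_start = False
--         else:
--             out.append(c)
--             at_start = c == "\n"
--             i += 1
--     return "".join(out)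
-- ===== Notes on version B (the rewrite author's own statement) =====
-- stated objective: alternative
-- what changed: Replaces A's split-into-lines / per-line-transform / join pipeline with a single streaming pass over the characters that tracks a line-start flag and rewrites each '#'-run at a line start in place.
import Mathlib
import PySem

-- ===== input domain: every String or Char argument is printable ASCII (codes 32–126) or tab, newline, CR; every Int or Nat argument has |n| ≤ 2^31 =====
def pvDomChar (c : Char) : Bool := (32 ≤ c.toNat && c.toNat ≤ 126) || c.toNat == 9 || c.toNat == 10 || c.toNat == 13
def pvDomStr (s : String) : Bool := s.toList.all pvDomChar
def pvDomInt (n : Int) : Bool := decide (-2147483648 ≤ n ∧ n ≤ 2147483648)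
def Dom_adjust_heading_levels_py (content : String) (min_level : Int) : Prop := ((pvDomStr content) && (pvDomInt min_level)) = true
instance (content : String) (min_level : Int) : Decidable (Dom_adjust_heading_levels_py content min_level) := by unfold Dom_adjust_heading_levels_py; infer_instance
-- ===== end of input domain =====

-- B replaces A's split-into-lines / per-line transform / join pipeline by one streaming pass
-- over the characters with a line-start flag (objective: alternative).

-- ===== PORT A =====
-- hand port of line.lstrip("#"): drops exactly the leading '#' characters (exact)
def pvLstripHash : List Char → List Char
  | [] => []
  | c :: r => if c == '#' then pvLstripHash r else c :: r

-- the body of A's for-loop for one line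
def pvAdjustLineA (min_level : Int) (line : List Char) : List Char :=
  if PySem.Chars.startswith line ['#'] then
    let level : Int := PySem.Chars.len line - PySem.Chars.len (pvLstripHash line)
    let new_level := max level min_level
    PySem.List.pyRepeat ['#'] new_level ++ PySem.Chars.slice line (some level) none
  else line

def adjust_heading_levels_py (content : String) (min_level : Int) : String :=
  let lines := PySem.Chars.splitOn content.toList ['\n']
  let adjusted_lines := lines.map (pvAdjustLineA min_level)
  String.mk (PySem.Chars.join ['\n'] adjusted_lines)

-- ===== PORT B =====
-- B's inner while loop: length of the run of '#' at the front
def pvRunLen : List Char → Nat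
  | [] => 0
  | c :: r => if c == '#' then pvRunLen r + 1 else 0

-- B's outer while loop: one pass, `at_start` tracks whether we are at a line start
def pvBGo (min_level : Int) : List Char → Bool → List Char
  | [], _ => []
  | c :: rest, at_start =>
    if h : at_start && (c == '#') then
      let k := pvRunLen (c :: rest)
      List.replicate (max (k : Int) min_level).toNat '#' ++
        pvBGo min_level (List.drop k (c :: rest)) false
    else
      c :: pvBGo min_level rest (c == '\n')
termination_by cs _ => cs.length
decreasing_by
  · simp only [List.length_drop]
    have hc : c == '#' := by simpa using (Bool.and_elim_right h)
    have : 1 ≤ pvRunLen (c :: rest) := by simp [pvRunLen, hc]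
    simp only [List.length_cons]; omega
  · simp

def adjust_heading_levels_py_alt (content : String) (min_level : Int) : String :=
  String.mk (pvBGo min_level content.toList true)

-- ===== PRECONDITION & SPEC =====
def Spec_adjust_heading_levels_py (content : String) (min_level : Int) (out : String) : Prop := out = adjust_heading_levels_py_alt content min_level
instance (content : String) (min_level : Int) (out : String) : Decidable (Spec_adjust_heading_levels_py content min_level out) := by unfold Spec_adjust_heading_levels_py; infer_instance

-- ===== CLAIM (what is proved, stated in full; the proofs are below) =====
def Claim_equal_adjust_heading_levels_py : Prop := ∀ (content : String) (min_level : Int), Dom_adjust_heading_levels_py content min_level → Spec_adjust_heading_levels_py content min_level (adjust_heading_levels_py content min_level)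

-- ===== LEMMAS AND PROOFS =====

-- proof-side reference splitter: what content.split("\n") computes, structurally
def splitNl : List Char → List (List Char)
  | [] => [[]]
  | c :: r => if c = '\n' then [] :: splitNl r else (splitNl r).modifyHead (c :: ·)

theorem splitNl_ne_nil (cs : List Char) : splitNl cs ≠ [] := by
  cases cs with
  | nil => simp [splitNl]
  | cons c r =>
      have h := splitNl_ne_nil r
      simp only [splitNl]
      split
      · simp
      · cases hs : splitNl r with
        | nil => exact absurd hs h
        | cons p ps => simp [hs]

theorem splitNl_no_nl (l : List Char) (h : '\n' ∉ l) : splitNl l = [l] := by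
  induction l with
  | nil => rfl
  | cons c r ih =>
      have hc : ¬ c = '\n' := fun hc => h (by simp [hc])
      have hr : '\n' ∉ r := fun hr => h (by simp [hr])
      simp [splitNl, hc, ih hr]

theorem splitNl_append (l r : List Char) (h : '\n' ∉ l) :
    splitNl (l ++ '\n' :: r) = l :: splitNl r := by
  induction l with
  | nil => simp [splitNl]
  | cons c l' ih =>
      have hc : ¬ c = '\n' := fun hc => h (by simp [hc])
      have hl : '\n' ∉ l' := fun hl => h (by simp [hl])
      simp [splitNl, hc, ih hl]

theorem go_eq (l : List Char) : ∀ (fuel : Nat) (cur : List Char) (acc : List (List Char)) (_ : l.length ≤ fuel),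
    PySem.Chars.splitOn.go ['\n'] fuel l cur acc
      = acc.reverse ++ (splitNl l).modifyHead (cur.reverse ++ ·) := by
  induction l with
  | nil =>
      intro fuel cur acc _
      cases fuel <;> rw [PySem.Chars.splitOn.go.eq_def] <;> simp [splitNl]
  | cons c rest ih =>
      intro fuel cur acc hle
      cases fuel with
      | zero => simp at hle
      | succ f =>
          by_cases hc : c = '\n'
          · have hpre : List.isPrefixOf ['\n'] (c :: rest) = true := by
              simp [List.isPrefixOf, hc]
            rw [PySem.Chars.splitOn.go.eq_def]
            simp only [hpre, if_true]
            have hdrop : List.drop (['\n'] : List Char).length (c :: rest) = rest := rfl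
            rw [hdrop, ih f [] (cur.reverse :: acc) (by simp at hle; omega)]
            cases hs : splitNl rest with
            | nil => exact absurd hs (splitNl_ne_nil rest)
            | cons p ps => simp [splitNl, hc, hs]
          · have hpre : List.isPrefixOf ['\n'] (c :: rest) = false := by
              simp [List.isPrefixOf]; exact fun h => absurd h.symm hc
            rw [PySem.Chars.splitOn.go.eq_def]
            simp only [hpre, Bool.false_eq_true, if_false]
            rw [ih f (c :: cur) acc (by simp at hle; omega)]
            cases hs : splitNl rest with
            | nil => exact absurd hs (splitNl_ne_nil rest)
            | cons p ps => simp [splitNl, hc, hs]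

theorem splitOn_nl (cs : List Char) : PySem.Chars.splitOn cs ['\n'] = splitNl cs := by
  unfold PySem.Chars.splitOn
  rw [go_eq cs (cs.length + 1) [] [] (by omega)]
  cases hs : splitNl cs with
  | nil => exact absurd hs (splitNl_ne_nil cs)
  | cons p ps => simp

theorem lstrip_eq_drop (l : List Char) : pvLstripHash l = List.drop (pvRunLen l) l := by
  induction l with
  | nil => rfl
  | cons c r ih =>
      by_cases hc : c = '#'
      · simp [pvLstripHash, pvRunLen, hc, ih]
      · simp [pvLstripHash, pvRunLen, hc]

theorem runLen_le (l : List Char) : pvRunLen l ≤ l.length := by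
  induction l with
  | nil => simp [pvRunLen]
  | cons c r ih =>
      by_cases hc : c = '#' <;> simp [pvRunLen, hc] <;> omega

theorem runLen_append_nl (l r : List Char) :
    pvRunLen (l ++ '\n' :: r) = pvRunLen l := by
  induction l with
  | nil => simp [pvRunLen]
  | cons c l' ih =>
      by_cases hc : c = '#' <;> simp [pvRunLen, hc, ih]

theorem adjA_hash (ml : Int) (l : List Char) (h : PySem.Chars.startswith l ['#'] = true) :
    pvAdjustLineA ml l
      = List.replicate (max ((pvRunLen l : Nat) : Int) ml).toNat '#' ++ List.drop (pvRunLen l) l := by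
  have hk := runLen_le l
  have hlev : PySem.Chars.len l - PySem.Chars.len (pvLstripHash l)
      = ((pvRunLen l : Nat) : Int) := by
    rw [lstrip_eq_drop]
    simp only [PySem.Chars.len_eq, List.length_drop]
    omega
  unfold pvAdjustLineA
  rw [if_pos h]
  show PySem.List.pyRepeat ['#']
      (max (PySem.Chars.len l - PySem.Chars.len (pvLstripHash l)) ml) ++
      PySem.Chars.slice l (some (PySem.Chars.len l - PySem.Chars.len (pvLstripHash l))) = _
  rw [hlev, PySem.List.pyRepeat_singleton, PySem.Chars.slice_eq_listSlice,
    PySem.List.slice_from_natCast]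

theorem adjA_nohash (ml : Int) (l : List Char) (h : PySem.Chars.startswith l ['#'] = false) :
    pvAdjustLineA ml l = l := by
  unfold pvAdjustLineA
  rw [if_neg (by simp [h])]

theorem startswith_cons (c : Char) (r : List Char) :
    PySem.Chars.startswith (c :: r) ['#'] = (c == '#') := by
  by_cases hc : c = '#' <;> simp [PySem.Chars.startswith, List.isPrefixOf, hc]
  exact fun h => absurd h.symm hc

theorem pvBGo_nil (ml : Int) (b : Bool) : pvBGo ml [] b = [] := by
  rw [pvBGo]

theorem pvBGo_else (ml : Int) (c : Char) (rest : List Char) (b : Bool)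
    (h : (b && (c == '#')) = false) :
    pvBGo ml (c :: rest) b = c :: pvBGo ml rest (c == '\n') := by
  rw [pvBGo]
  simp [h]

theorem pvBGo_hash (ml : Int) (c : Char) (rest : List Char) (h : c = '#') :
    pvBGo ml (c :: rest) true
      = List.replicate (max ((pvRunLen (c :: rest) : Nat) : Int) ml).toNat '#' ++
          pvBGo ml (List.drop (pvRunLen (c :: rest)) (c :: rest)) false := by
  rw [pvBGo]
  have hcond : (true && (c == '#')) = true := by simp [h]
  rw [dif_pos hcond]

theorem bcopy2 (ml : Int) (l : List Char) (h : '\n' ∉ l) : pvBGo ml l false = l := by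
  induction l with
  | nil => exact pvBGo_nil ml false
  | cons c r ih =>
      have hc : ¬ c = '\n' := fun hc => h (by simp [hc])
      have hr : '\n' ∉ r := fun hr => h (by simp [hr])
      rw [pvBGo_else ml c r false (by simp)]
      have hcf : (c == '\n') = false := by simp [hc]
      rw [hcf, ih hr]

theorem bcopy (ml : Int) (l r : List Char) (h : '\n' ∉ l) :
    pvBGo ml (l ++ '\n' :: r) false = l ++ '\n' :: pvBGo ml r true := by
  induction l with
  | nil =>
      rw [List.nil_append, pvBGo_else ml '\n' r false (by simp)]
      simp
  | cons c l' ih =>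
      have hc : ¬ c = '\n' := fun hc => h (by simp [hc])
      have hl : '\n' ∉ l' := fun hl => h (by simp [hl])
      rw [List.cons_append, pvBGo_else ml c _ false (by simp)]
      have hcf : (c == '\n') = false := by simp [hc]
      rw [hcf, ih hl, List.cons_append]

theorem nl_not_mem_drop (l : List Char) (k : Nat) (h : '\n' ∉ l) : '\n' ∉ List.drop k l :=
  fun hm => h (List.mem_of_mem_drop hm)

theorem bline_nonl (ml : Int) (l : List Char) (h : '\n' ∉ l) :
    pvBGo ml l true = pvAdjustLineA ml l := by
  cases l with
  | nil =>
      rw [pvBGo_nil]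
      rw [adjA_nohash ml [] (by simp [PySem.Chars.startswith, List.isPrefixOf])]
  | cons c r =>
      by_cases hc : c = '#'
      · rw [pvBGo_hash ml c r hc,
          bcopy2 ml _ (nl_not_mem_drop _ _ h),
          adjA_hash ml _ (by simp [startswith_cons, hc])]
      · have hcn : ¬ c = '\n' := fun hcn => h (by simp [hcn])
        have hr : '\n' ∉ r := fun hr => h (by simp [hr])
        rw [pvBGo_else ml c r true (by simp [hc]),
          adjA_nohash ml _ (by simp [startswith_cons, hc])]
        have hcf : (c == '\n') = false := by simp [hcn]
        rw [hcf, bcopy2 ml r hr]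

theorem bline_append (ml : Int) (l r : List Char) (h : '\n' ∉ l) :
    pvBGo ml (l ++ '\n' :: r) true = pvAdjustLineA ml l ++ '\n' :: pvBGo ml r true := by
  cases l with
  | nil =>
      rw [List.nil_append, pvBGo_else ml '\n' r true (by simp)]
      rw [adjA_nohash ml [] (by simp [PySem.Chars.startswith, List.isPrefixOf])]
      simp
  | cons c l' =>
      by_cases hc : c = '#'
      · rw [List.cons_append, pvBGo_hash ml c _ hc]
        have hrun : pvRunLen (c :: (l' ++ '\n' :: r)) = pvRunLen (c :: l') := by
          have := runLen_append_nl (c :: l') r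
          simpa using this
        have hkle : pvRunLen (c :: l') ≤ (c :: l').length := runLen_le _
        rw [hrun, show (c :: (l' ++ '\n' :: r)) = (c :: l') ++ '\n' :: r from rfl,
          List.drop_append_of_le_length hkle,
          bcopy ml _ r (nl_not_mem_drop _ _ h),
          adjA_hash ml _ (by simp [startswith_cons, hc])]
        simp
      · have hcn : ¬ c = '\n' := fun hcn => h (by simp [hcn])
        have hl : '\n' ∉ l' := fun hl => h (by simp [hl])
        rw [List.cons_append, pvBGo_else ml c _ true (by simp [hc])]
        have hcf : (c == '\n') = false := by simp [hcn]
        rw [hcf, bcopy ml l' r hl,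
          adjA_nohash ml _ (by simp [startswith_cons, hc]), List.cons_append]

theorem exists_split (cs : List Char) (h : '\n' ∈ cs) :
    ∃ l r, '\n' ∉ l ∧ cs = l ++ '\n' :: r := by
  induction cs with
  | nil => simp at h
  | cons c rest ih =>
      by_cases hc : c = '\n'
      · exact ⟨[], rest, by simp, by simp [hc]⟩
      · have hr : '\n' ∈ rest := by
          rcases List.mem_cons.mp h with h1 | h1
          · exact absurd h1.symm hc
          · exact h1
        obtain ⟨l, r, h1, h2⟩ := ih hr
        exact ⟨c :: l, r, by simp [h1]; exact fun hh => hc hh.symm, by simp [h2]⟩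

theorem main_aux (ml : Int) : ∀ (n : Nat) (cs : List Char), cs.length ≤ n →
    PySem.Chars.join ['\n'] ((splitNl cs).map (pvAdjustLineA ml)) = pvBGo ml cs true := by
  intro n
  induction n with
  | zero =>
      intro cs hlen
      have : cs = [] := List.eq_nil_of_length_eq_zero (by omega)
      subst this
      simp [splitNl, PySem.Chars.join_singleton, pvAdjustLineA, PySem.Chars.startswith,
        List.isPrefixOf, pvBGo]
  | succ n ih =>
      intro cs hlen
      by_cases hmem : '\n' ∈ cs
      · obtain ⟨l, r, hnl, rfl⟩ := exists_split cs hmem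
        rw [splitNl_append l r hnl, List.map_cons]
        cases hs : (splitNl r).map (pvAdjustLineA ml) with
        | nil => exact absurd (List.map_eq_nil_iff.mp hs) (splitNl_ne_nil r)
        | cons p ps =>
            rw [PySem.Chars.join_cons_cons, ← hs,
              ih r (by simp at hlen; omega),
              bline_append ml l r hnl]
            simp
      · rw [splitNl_no_nl cs hmem, List.map_cons, List.map_nil,
          PySem.Chars.join_singleton, bline_nonl ml cs hmem]

-- ===== VERDICT (by name: the statement is the Claim_ definition above) =====
theorem adjust_heading_levels_py_spec : Claim_equal_adjust_heading_levels_py := by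
  intro content min_level _
  unfold Spec_adjust_heading_levels_py adjust_heading_levels_py adjust_heading_levels_py_alt
  rw [splitOn_nl]
  show String.mk (PySem.Chars.join ['\n'] ((splitNl content.toList).map (pvAdjustLineA min_level)))
      = String.mk (pvBGo min_level content.toList true)
  rw [main_aux min_level content.toList.length content.toList (le_refl _)]
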